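-- pv_equiv track=rewrite | github.com/hoquem/KICKAI | src/agents/intelligent_system.py | _simplify_response
-- ===== SOURCE A (Python) =====
-- def _simplify_response(response: str) -> str:
--     """Simplify response for beginner users."""
--     # Remove technical terms
--     technical_terms = {
--         "registration": "sign up",
--         "approval": "permission",
--         "coordination": "organization",
--         "analytics": "information"
--     }
--
--     for technical, simple in technical_terms.items():
--         response = response.replace(technical, simple)
--
--     return response
-- ===== SOURCE B (Python) =====
-- def _simplify_response(response: str) -> str:
--     """Simplify response for beginner users (single left-to-right scan)."""
--     mapping = {
--         "registration": "sign up",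
--         "approval": "permission",
--         "coordination": "organization",
--         "analytics": "information"
--     }
--     pieces = []
--     i = 0
--     n = len(response)
--     while i < n:
--         for technical, simple in mapping.items():
--             if response.startswith(technical, i):
--                 pieces.append(simple)
--                 i += len(technical)
--                 break
--         else:
--             pieces.append(response[i])
--             i += 1
--     return "".join(pieces)
-- ===== Notes on version B (the rewrite author's own statement) =====
-- stated objective: alternative
-- what changed: Replaces A's four sequential full-string .replace passes with a single left-to-right scan that checks the four technical terms at each position and emits the replacement or the character, so the string is traversed once and replacement text is never rescanned.
-- intended difference: On inputs containing the substring 'analyticregistration', A's fourth pass rescans the text its first pass produced (the inserted replacement completes a new occurrence of the fourth technical term) and replaces that occurrence too, while B's single pass replaces only the original term occurrences; B's is the intended value because replacement words were never meant to be treated as technical terms. — e.g. on _simplify_response("analyticregistration"): A returns "informationign up", B returns "analyticsign up"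
import Mathlib
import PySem

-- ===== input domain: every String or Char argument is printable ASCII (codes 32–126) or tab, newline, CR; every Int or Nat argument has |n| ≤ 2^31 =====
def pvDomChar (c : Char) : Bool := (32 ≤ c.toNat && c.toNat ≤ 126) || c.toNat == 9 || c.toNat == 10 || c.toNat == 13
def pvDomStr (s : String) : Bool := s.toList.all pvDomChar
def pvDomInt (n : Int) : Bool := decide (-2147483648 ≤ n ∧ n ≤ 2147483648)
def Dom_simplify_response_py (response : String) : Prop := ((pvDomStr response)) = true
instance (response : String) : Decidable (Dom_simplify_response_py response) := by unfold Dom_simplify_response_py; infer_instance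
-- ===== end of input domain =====

-- B replaces A's four sequential full-string replace passes by one left-to-right scan over the
-- input (alternative decomposition, same cost class); on inputs containing "analyticregistration"
-- A's later pass cascades into earlier replacement text and B intentionally does not (see D_).


-- ===== PORT A =====
-- the dict literal, in insertion order, and the for-loop over .items() as a fold
def simplify_response_py (response : String) : String :=
  [("registration", "sign up"), ("approval", "permission"),
   ("coordination", "organization"), ("analytics", "information")].foldl
    (fun resp ts => PySem.Str.replace resp ts.1 ts.2) response

-- ===== PORT B =====
-- the while-loop of Source B: at each position try the four terms in order (for/break), else copy one char
def simplify_response_py_altGo : Nat → List Char → List Char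
  | _, [] => []
  | 0, _ :: _ => []
  | fuel + 1, c :: t =>
    if List.isPrefixOf "registration".toList (c :: t) = true then
      "sign up".toList ++ simplify_response_py_altGo fuel (List.drop 12 (c :: t))
    else if List.isPrefixOf "approval".toList (c :: t) = true then
      "permission".toList ++ simplify_response_py_altGo fuel (List.drop 8 (c :: t))
    else if List.isPrefixOf "coordination".toList (c :: t) = true then
      "organization".toList ++ simplify_response_py_altGo fuel (List.drop 12 (c :: t))
    else if List.isPrefixOf "analytics".toList (c :: t) = true then
      "information".toList ++ simplify_response_py_altGo fuel (List.drop 9 (c :: t))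
    else c :: simplify_response_py_altGo fuel t

def simplify_response_py_alt (response : String) : String :=
  String.ofList (simplify_response_py_altGo response.toList.length response.toList)

-- ===== PRECONDITION & SPEC =====
-- On inputs containing "analyticregistration", A's fourth pass rescans its first pass's output
-- (the inserted replacement completes a new "analytics" occurrence) and replaces that too;
-- B's single pass replaces only original term occurrences, the intended behaviour.
def D_simplify_response_py (response : String) : Prop :=
  PySem.Str.isIn "analyticregistration" response = true
instance (response : String) : Decidable (D_simplify_response_py response) := by
  unfold D_simplify_response_py; infer_instance

def Spec_simplify_response_py (response : String) (out : String) : Prop :=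
  ¬ D_simplify_response_py response → out = simplify_response_py_alt response
instance (response : String) (out : String) : Decidable (Spec_simplify_response_py response out) := by
  unfold Spec_simplify_response_py; infer_instance

def pvDiffWitness_simplify_response_py : String := "analyticregistration"
def pvDiffWitnessOut_simplify_response_py : String × String := ("informationign up", "analyticsign up")

-- ===== CLAIM (what is proved, stated in full; the proofs are below) =====
def Claim_unchanged_simplify_response_py : Prop := ∀ (response : String), Dom_simplify_response_py response → Spec_simplify_response_py response (simplify_response_py response)
def Claim_changed_simplify_response_py : Prop := Dom_simplify_response_py (pvDiffWitness_simplify_response_py) ∧ D_simplify_response_py (pvDiffWitness_simplify_response_py) ∧ simplify_response_py (pvDiffWitness_simplify_response_py) = pvDiffWitnessOut_simplify_response_py.1 ∧ simplify_response_py_alt (pvDiffWitness_simplify_response_py) = pvDiffWitnessOut_simplify_response_py.2 ∧ pvDiffWitnessOut_simplify_response_py.1 ≠ pvDiffWitnessOut_simplify_response_py.2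

def Claim_exact_simplify_response_py : Prop := ∀ (response : String), Dom_simplify_response_py response → D_simplify_response_py response → simplify_response_py response ≠ simplify_response_py_alt response

-- ===== LEMMAS AND PROOFS =====

-- proof-side single-key replace with the key split as head/tail so that it is structurally recursive
def pvRep (o : Char) (os new : List Char) : List Char → List Char
  | [] => []
  | c :: t =>
    if List.isPrefixOf (o :: os) (c :: t) = true then
      new ++ pvRep o os new (List.drop (os.length + 1) (c :: t))
    else c :: pvRep o os new t
  termination_by l => l.length
  decreasing_by all_goals (simp only [List.length_drop, List.length_cons]; omega)

theorem pvRep_nil (o : Char) (os new : List Char) : pvRep o os new [] = [] := by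
  simp [pvRep]

theorem pvRep_cons_pos (o : Char) (os new : List Char) (c : Char) (t : List Char)
    (h : (o :: os) <+: (c :: t)) :
    pvRep o os new (c :: t) = new ++ pvRep o os new (List.drop (os.length + 1) (c :: t)) := by
  rw [pvRep, if_pos (List.isPrefixOf_iff_prefix.mpr h)]

theorem pvRep_cons_neg (o : Char) (os new : List Char) (c : Char) (t : List Char)
    (h : ¬ (o :: os) <+: (c :: t)) :
    pvRep o os new (c :: t) = c :: pvRep o os new t := by
  rw [pvRep, if_neg (fun hb => h (List.isPrefixOf_iff_prefix.mp hb))]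

theorem pvRep_pos (o : Char) (os new : List Char) {l : List Char} (h : (o :: os) <+: l) :
    pvRep o os new l = new ++ pvRep o os new (List.drop (os.length + 1) l) := by
  cases l with
  | nil => exact absurd (List.prefix_nil.mp h) (by simp)
  | cons c t => exact pvRep_cons_pos o os new c t h

theorem pvRep_go (o : Char) (os new : List Char) :
    ∀ (fuel : Nat) (l acc : List Char), l.length ≤ fuel →
      PySem.Chars.replace.go (o :: os) new fuel l acc = acc.reverse ++ pvRep o os new l := by
  intro fuel
  induction fuel with
  | zero =>
    intro l acc h
    have hl : l = [] := List.eq_nil_of_length_eq_zero (Nat.le_zero.mp h)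
    subst hl
    simp [PySem.Chars.replace.go, pvRep_nil]
  | succ n ih =>
    intro l acc h
    cases l with
    | nil => simp [PySem.Chars.replace.go, pvRep_nil]
    | cons c t =>
      by_cases hp : (o :: os) <+: (c :: t)
      · have hb : List.isPrefixOf (o :: os) (c :: t) = true := List.isPrefixOf_iff_prefix.mpr hp
        rw [PySem.Chars.replace.go]
        simp only [hb, if_true, List.length_cons]
        rw [ih (List.drop (os.length + 1) (c :: t)) (new.reverse ++ acc)
            (by simp only [List.length_drop, List.length_cons] at *; omega)]
        rw [pvRep_cons_pos o os new c t hp]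
        simp [List.append_assoc]
      · have hb : List.isPrefixOf (o :: os) (c :: t) = false :=
          Bool.eq_false_iff.mpr (fun hb => hp (List.isPrefixOf_iff_prefix.mp hb))
        rw [PySem.Chars.replace.go]
        simp only [hb, if_false, Bool.false_eq_true]
        rw [ih t (c :: acc) (by simpa using Nat.le_of_succ_le_succ (by simpa using h))]
        rw [pvRep_cons_neg o os new c t hp]
        simp

theorem replace_eq_pvRep (o : Char) (os new l : List Char) :
    PySem.Chars.replace l (o :: os) new = pvRep o os new l := by
  rw [PySem.Chars.replace]
  simp only [List.isEmpty_cons, if_false, Bool.false_eq_true]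
  simpa using pvRep_go o os new l.length l [] le_rfl

-- prefix comparability: a prefix of w ++ X agrees with w on their common part
theorem pv_take_prefix {k w X : List Char} (h : k <+: (w ++ X)) :
    List.take k.length w <+: k := by
  rcases List.prefix_or_prefix_of_prefix h (List.prefix_append w X) with h1 | h1
  · have he : List.take k.length w = k := (List.prefix_iff_eq_take.mp h1).symm
    rw [he]
  · rw [List.take_of_length_le h1.length_le]
    exact h1

theorem pv_not_prefix_append {k w : List Char} (h : ¬ (List.take k.length w <+: k))
    (X : List Char) : ¬ k <+: (w ++ X) :=
  fun hp => h (pv_take_prefix hp)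

-- "the key k can start nowhere inside w": mismatch already within the literal window
def pvClean (k w : List Char) : Prop :=
  ∀ i, i < w.length → ¬ (List.take k.length (List.drop i w) <+: k)

theorem pvRep_append (o : Char) (os new : List Char) :
    ∀ (w X : List Char), pvClean (o :: os) w →
      pvRep o os new (w ++ X) = w ++ pvRep o os new X := by
  intro w
  induction w with
  | nil => intro X _; simp
  | cons c w' ih =>
    intro X h
    have h0 : ¬ ((o :: os) <+: ((c :: w') ++ X)) :=
      pv_not_prefix_append (by simpa using h 0 (by simp)) X
    have hstep : pvRep o os new (c :: (w' ++ X)) = c :: pvRep o os new (w' ++ X) :=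
      pvRep_cons_neg o os new c (w' ++ X) (by simpa using h0)
    have hshift : pvClean (o :: os) w' := by
      intro i hi
      simpa using h (i + 1) (by simpa using Nat.succ_lt_succ hi)
    simp only [List.cons_append, hstep, ih X hshift]

-- if no nonempty suffix of k2 can begin like the replacement text r, then a k2-prefix
-- of the replaced string was already a k2-prefix of the original
theorem pvTransfer (o : Char) (os r k2 : List Char)
    (H : ∀ s ∈ k2.tails, s ≠ [] → ¬ (List.take s.length r <+: s)) :
    ∀ (fuel : Nat) (l s : List Char), l.length ≤ fuel → s <:+ k2 → s ≠ [] →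
      s <+: pvRep o os r l → s <+: l := by
  intro fuel
  induction fuel with
  | zero =>
    intro l s hl hs hne hp
    have hnil : l = [] := List.eq_nil_of_length_eq_zero (Nat.le_zero.mp hl)
    subst hnil
    rw [pvRep_nil] at hp
    exact absurd (List.prefix_nil.mp hp) hne
  | succ n ih =>
    intro l s hl hs hne hp
    cases l with
    | nil =>
      rw [pvRep_nil] at hp
      exact absurd (List.prefix_nil.mp hp) hne
    | cons c t =>
      by_cases hpre : (o :: os) <+: (c :: t)
      · rw [pvRep_pos o os r hpre] at hp
        exact absurd (pv_take_prefix hp) (H s ((List.mem_tails _ _).mpr hs) hne)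
      · rw [pvRep_cons_neg o os r c t hpre] at hp
        cases s with
        | nil => exact absurd rfl hne
        | cons s0 s' =>
          obtain ⟨rfl, hp'⟩ := List.cons_prefix_cons.mp hp
          cases hs' : s' with
          | nil => exact List.cons_prefix_cons.mpr ⟨rfl, List.nil_prefix⟩
          | cons s1 s'' =>
            subst hs'
            have hsuf : (s1 :: s'') <:+ k2 := List.IsSuffix.trans ⟨[s0], rfl⟩ hs
            have hrec := ih t (s1 :: s'')
              (by simp only [List.length_cons] at hl ⊢; omega) hsuf (by simp) hp'
            exact List.cons_prefix_cons.mpr ⟨rfl, hrec⟩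

-- the four passes of A, in order, and their composition
def repReg (l : List Char) : List Char := pvRep 'r' "egistration".toList "sign up".toList l
def repApp (l : List Char) : List Char := pvRep 'a' "pproval".toList "permission".toList l
def repCoo (l : List Char) : List Char := pvRep 'c' "oordination".toList "organization".toList l
def repAna (l : List Char) : List Char := pvRep 'a' "nalytics".toList "information".toList l
def pvF (l : List Char) : List Char := repAna (repCoo (repApp (repReg l)))

-- refined transfer through the first pass: an "analytics"-suffix-prefix of repReg l is either
-- already there in l, or ends with the 's' of an inserted "sign up" (the cascade pattern)
theorem pvAnaReg :
    ∀ (fuel : Nat) (l s : List Char), l.length ≤ fuel → s <:+ "analytics".toList → s ≠ [] →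
      s <+: repReg l →
      s <+: l ∨ (s.dropLast <+: l ∧ "registration".toList <+: List.drop (s.length - 1) l) := by
  have key : ∀ s ∈ ("analytics".toList).tails, s ≠ [] →
      (List.take s.length "sign up".toList <+: s) → s = ['s'] := by decide
  intro fuel
  induction fuel with
  | zero =>
    intro l s hl hs hne hp
    have hnil : l = [] := List.eq_nil_of_length_eq_zero (Nat.le_zero.mp hl)
    subst hnil
    rw [repReg, pvRep_nil] at hp
    exact absurd (List.prefix_nil.mp hp) hne
  | succ n ih =>
    intro l s hl hs hne hp
    cases l with
    | nil =>
      rw [repReg, pvRep_nil] at hp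
      exact absurd (List.prefix_nil.mp hp) hne
    | cons c t =>
      by_cases hpre : ('r' :: "egistration".toList) <+: (c :: t)
      · rw [repReg, pvRep_pos _ _ _ hpre] at hp
        have hs1 : s = ['s'] := key s ((List.mem_tails _ _).mpr hs) hne (pv_take_prefix hp)
        subst hs1
        right
        exact ⟨List.nil_prefix, hpre⟩
      · rw [repReg, pvRep_cons_neg _ _ _ _ _ hpre] at hp
        cases s with
        | nil => exact absurd rfl hne
        | cons s0 s' =>
          obtain ⟨rfl, hp'⟩ := List.cons_prefix_cons.mp hp
          cases hs' : s' with
          | nil => exact Or.inl (List.cons_prefix_cons.mpr ⟨rfl, List.nil_prefix⟩)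
          | cons s1 s'' =>
            subst hs'
            have hsuf : (s1 :: s'') <:+ "analytics".toList := List.IsSuffix.trans ⟨[s0], rfl⟩ hs
            have hrec := ih t (s1 :: s'')
              (by simp only [List.length_cons] at hl ⊢; omega) hsuf (by simp) hp'
            rcases hrec with h1 | ⟨h2, h3⟩
            · exact Or.inl (List.cons_prefix_cons.mpr ⟨rfl, h1⟩)
            · right
              constructor
              · rw [List.dropLast_cons₂]
                exact List.cons_prefix_cons.mpr ⟨rfl, h2⟩
              · simpa using h3

theorem pvPrefixExtend {p q l : List Char} (h1 : p <+: l) (h2 : q <+: List.drop p.length l) :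
    (p ++ q) <+: l := by
  obtain ⟨t, rfl⟩ := h1
  rw [List.drop_left] at h2
  obtain ⟨u, rfl⟩ := h2
  exact ⟨u, by simp⟩

theorem pvAnaThroughReg {l : List Char} (h : "analytics".toList <+: repReg l) :
    "analytics".toList <+: l ∨ "analyticregistration".toList <+: l := by
  rcases pvAnaReg l.length l _ le_rfl (List.suffix_refl _) (by decide) h with h1 | ⟨h2, h3⟩
  · exact Or.inl h1
  · right
    have h2' : "analytic".toList <+: l := by
      have e : ("analytics".toList).dropLast = "analytic".toList := by decide
      rwa [e] at h2
    have h3' : "registration".toList <+: List.drop ("analytic".toList).length l := by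
      have e : ("analytic".toList).length = ("analytics".toList).length - 1 := by decide
      rwa [e]
    have := pvPrefixExtend h2' h3'
    have e : "analytic".toList ++ "registration".toList = "analyticregistration".toList := by decide
    rwa [e] at this

-- per-pass equation lemmas (drop amounts written as the concrete term lengths)
theorem repReg_pos {l : List Char} (h : "registration".toList <+: l) :
    repReg l = "sign up".toList ++ repReg (List.drop 12 l) := by
  rw [repReg, pvRep_pos 'r' "egistration".toList "sign up".toList h]; rfl

theorem repApp_pos {l : List Char} (h : "approval".toList <+: l) :
    repApp l = "permission".toList ++ repApp (List.drop 8 l) := by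
  rw [repApp, pvRep_pos 'a' "pproval".toList "permission".toList h]; rfl

theorem repCoo_pos {l : List Char} (h : "coordination".toList <+: l) :
    repCoo l = "organization".toList ++ repCoo (List.drop 12 l) := by
  rw [repCoo, pvRep_pos 'c' "oordination".toList "organization".toList h]; rfl

theorem repAna_pos {l : List Char} (h : "analytics".toList <+: l) :
    repAna l = "information".toList ++ repAna (List.drop 9 l) := by
  rw [repAna, pvRep_pos 'a' "nalytics".toList "information".toList h]; rfl

theorem repReg_neg {c : Char} {t : List Char} (h : ¬ "registration".toList <+: (c :: t)) :
    repReg (c :: t) = c :: repReg t := pvRep_cons_neg _ _ _ _ _ h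

theorem repApp_neg {c : Char} {t : List Char} (h : ¬ "approval".toList <+: (c :: t)) :
    repApp (c :: t) = c :: repApp t := pvRep_cons_neg _ _ _ _ _ h

theorem repCoo_neg {c : Char} {t : List Char} (h : ¬ "coordination".toList <+: (c :: t)) :
    repCoo (c :: t) = c :: repCoo t := pvRep_cons_neg _ _ _ _ _ h

theorem repAna_neg {c : Char} {t : List Char} (h : ¬ "analytics".toList <+: (c :: t)) :
    repAna (c :: t) = c :: repAna t := pvRep_cons_neg _ _ _ _ _ h

-- no later key can start inside an earlier key or replacement word (checked by decide)
theorem repApp_sgn (Y : List Char) :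
    repApp ("sign up".toList ++ Y) = "sign up".toList ++ repApp Y :=
  pvRep_append _ _ _ _ _ (by unfold pvClean; decide)

theorem repCoo_sgn (Y : List Char) :
    repCoo ("sign up".toList ++ Y) = "sign up".toList ++ repCoo Y :=
  pvRep_append _ _ _ _ _ (by unfold pvClean; decide)

theorem repAna_sgn (Y : List Char) :
    repAna ("sign up".toList ++ Y) = "sign up".toList ++ repAna Y :=
  pvRep_append _ _ _ _ _ (by unfold pvClean; decide)

theorem repReg_appw (Y : List Char) :
    repReg ("approval".toList ++ Y) = "approval".toList ++ repReg Y :=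
  pvRep_append _ _ _ _ _ (by unfold pvClean; decide)

theorem repCoo_per (Y : List Char) :
    repCoo ("permission".toList ++ Y) = "permission".toList ++ repCoo Y :=
  pvRep_append _ _ _ _ _ (by unfold pvClean; decide)

theorem repAna_per (Y : List Char) :
    repAna ("permission".toList ++ Y) = "permission".toList ++ repAna Y :=
  pvRep_append _ _ _ _ _ (by unfold pvClean; decide)

theorem repReg_coow (Y : List Char) :
    repReg ("coordination".toList ++ Y) = "coordination".toList ++ repReg Y :=
  pvRep_append _ _ _ _ _ (by unfold pvClean; decide)

theorem repApp_coow (Y : List Char) :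
    repApp ("coordination".toList ++ Y) = "coordination".toList ++ repApp Y :=
  pvRep_append _ _ _ _ _ (by unfold pvClean; decide)

theorem repAna_org (Y : List Char) :
    repAna ("organization".toList ++ Y) = "organization".toList ++ repAna Y :=
  pvRep_append _ _ _ _ _ (by unfold pvClean; decide)

theorem repReg_anaw (Y : List Char) :
    repReg ("analytics".toList ++ Y) = "analytics".toList ++ repReg Y :=
  pvRep_append _ _ _ _ _ (by unfold pvClean; decide)

theorem repApp_anaw (Y : List Char) :
    repApp ("analytics".toList ++ Y) = "analytics".toList ++ repApp Y :=
  pvRep_append _ _ _ _ _ (by unfold pvClean; decide)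

theorem repCoo_anaw (Y : List Char) :
    repCoo ("analytics".toList ++ Y) = "analytics".toList ++ repCoo Y :=
  pvRep_append _ _ _ _ _ (by unfold pvClean; decide)

-- prefix transfer through each earlier pass (no suffix of the key begins like the inserted word)
theorem trans_app_reg {l : List Char} (h : "approval".toList <+: repReg l) :
    "approval".toList <+: l :=
  pvTransfer 'r' "egistration".toList "sign up".toList "approval".toList (by decide)
    l.length l _ le_rfl (List.suffix_refl _) (by decide) h

theorem trans_coo_reg {l : List Char} (h : "coordination".toList <+: repReg l) :
    "coordination".toList <+: l :=
  pvTransfer 'r' "egistration".toList "sign up".toList "coordination".toList (by decide)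
    l.length l _ le_rfl (List.suffix_refl _) (by decide) h

theorem trans_coo_per {l : List Char} (h : "coordination".toList <+: repApp l) :
    "coordination".toList <+: l :=
  pvTransfer 'a' "pproval".toList "permission".toList "coordination".toList (by decide)
    l.length l _ le_rfl (List.suffix_refl _) (by decide) h

theorem trans_ana_per {l : List Char} (h : "analytics".toList <+: repApp l) :
    "analytics".toList <+: l :=
  pvTransfer 'a' "pproval".toList "permission".toList "analytics".toList (by decide)
    l.length l _ le_rfl (List.suffix_refl _) (by decide) h

theorem trans_ana_org {l : List Char} (h : "analytics".toList <+: repCoo l) :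
    "analytics".toList <+: l :=
  pvTransfer 'c' "oordination".toList "organization".toList "analytics".toList (by decide)
    l.length l _ le_rfl (List.suffix_refl _) (by decide) h

-- the main induction: outside the cascade pattern, B's one scan equals A's four passes
theorem pvMain : ∀ (fuel : Nat) (l : List Char), l.length ≤ fuel →
    ¬ ("analyticregistration".toList <:+: l) →
    simplify_response_py_altGo fuel l = pvF l := by
  intro fuel
  induction fuel with
  | zero =>
    intro l hl _
    have hnil : l = [] := List.eq_nil_of_length_eq_zero (Nat.le_zero.mp hl)
    subst hnil
    simp [simplify_response_py_altGo, pvF, repReg, repApp, repCoo, repAna, pvRep_nil]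
  | succ n ih =>
    intro l hl hbad
    cases l with
    | nil => simp [simplify_response_py_altGo, pvF, repReg, repApp, repCoo, repAna, pvRep_nil]
    | cons c t =>
      by_cases h1 : "registration".toList <+: (c :: t)
      · have hb1 : List.isPrefixOf "registration".toList (c :: t) = true :=
          List.isPrefixOf_iff_prefix.mpr h1
        rw [simplify_response_py_altGo]
        simp only [hb1, if_true]
        have hF : pvF (c :: t) = "sign up".toList ++ pvF (List.drop 12 (c :: t)) := by
          rw [pvF, repReg_pos h1, repApp_sgn, repCoo_sgn, repAna_sgn]; rfl
        rw [hF]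
        congr 1
        exact ih (List.drop 12 (c :: t))
          (by simp only [List.length_drop, List.length_cons] at *; omega)
          (fun hx => hbad (hx.trans (List.drop_suffix 12 (c :: t)).isInfix))
      · by_cases h2 : "approval".toList <+: (c :: t)
        · have hb1 : List.isPrefixOf "registration".toList (c :: t) = false :=
            Bool.eq_false_iff.mpr (fun hb => h1 (List.isPrefixOf_iff_prefix.mp hb))
          have hb2 : List.isPrefixOf "approval".toList (c :: t) = true :=
            List.isPrefixOf_iff_prefix.mpr h2
          rw [simplify_response_py_altGo]
          simp only [hb1, hb2, if_true, if_false, Bool.false_eq_true]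
          obtain ⟨m, hm⟩ := h2
          have hdrop : List.drop 8 (c :: t) = m := by
            rw [← hm, show (8 : Nat) = ("approval".toList).length from rfl, List.drop_left]
          have hF : pvF (c :: t) = "permission".toList ++ pvF m := by
            rw [← hm, pvF, repReg_appw, repApp_pos (List.prefix_append _ _)]
            rw [show (8 : Nat) = ("approval".toList).length from rfl, List.drop_left]
            rw [repCoo_per, repAna_per]; rfl
          rw [hF, hdrop]
          congr 1
          refine ih m ?_ ?_
          · have := congrArg List.length hm
            simp only [List.length_append, List.length_cons,
                show ("approval".toList).length = 8 from rfl] at this hl ⊢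
            omega
          · intro hx
            exact hbad (hx.trans (show m <:+ (c :: t) from hm ▸ ⟨"approval".toList, rfl⟩).isInfix)
        · by_cases h3 : "coordination".toList <+: (c :: t)
          · have hb1 : List.isPrefixOf "registration".toList (c :: t) = false :=
              Bool.eq_false_iff.mpr (fun hb => h1 (List.isPrefixOf_iff_prefix.mp hb))
            have hb2 : List.isPrefixOf "approval".toList (c :: t) = false :=
              Bool.eq_false_iff.mpr (fun hb => h2 (List.isPrefixOf_iff_prefix.mp hb))
            have hb3 : List.isPrefixOf "coordination".toList (c :: t) = true :=
              List.isPrefixOf_iff_prefix.mpr h3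
            rw [simplify_response_py_altGo]
            simp only [hb1, hb2, hb3, if_true, if_false, Bool.false_eq_true]
            obtain ⟨m, hm⟩ := h3
            have hdrop : List.drop 12 (c :: t) = m := by
              rw [← hm, show (12 : Nat) = ("coordination".toList).length from rfl, List.drop_left]
            have hF : pvF (c :: t) = "organization".toList ++ pvF m := by
              rw [← hm, pvF, repReg_coow, repApp_coow, repCoo_pos (List.prefix_append _ _)]
              rw [show (12 : Nat) = ("coordination".toList).length from rfl, List.drop_left]
              rw [repAna_org]; rfl
            rw [hF, hdrop]
            congr 1
            refine ih m ?_ ?_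
            · have := congrArg List.length hm
              simp only [List.length_append, List.length_cons,
                show ("coordination".toList).length = 12 from rfl] at this hl ⊢
              omega
            · intro hx
              exact hbad (hx.trans (show m <:+ (c :: t) from hm ▸ ⟨"coordination".toList, rfl⟩).isInfix)
          · by_cases h4 : "analytics".toList <+: (c :: t)
            · have hb1 : List.isPrefixOf "registration".toList (c :: t) = false :=
                Bool.eq_false_iff.mpr (fun hb => h1 (List.isPrefixOf_iff_prefix.mp hb))
              have hb2 : List.isPrefixOf "approval".toList (c :: t) = false :=
                Bool.eq_false_iff.mpr (fun hb => h2 (List.isPrefixOf_iff_prefix.mp hb))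
              have hb3 : List.isPrefixOf "coordination".toList (c :: t) = false :=
                Bool.eq_false_iff.mpr (fun hb => h3 (List.isPrefixOf_iff_prefix.mp hb))
              have hb4 : List.isPrefixOf "analytics".toList (c :: t) = true :=
                List.isPrefixOf_iff_prefix.mpr h4
              rw [simplify_response_py_altGo]
              simp only [hb1, hb2, hb3, hb4, if_true, if_false, Bool.false_eq_true]
              obtain ⟨m, hm⟩ := h4
              have hdrop : List.drop 9 (c :: t) = m := by
                rw [← hm, show (9 : Nat) = ("analytics".toList).length from rfl, List.drop_left]
              have hF : pvF (c :: t) = "information".toList ++ pvF m := by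
                rw [← hm, pvF, repReg_anaw, repApp_anaw, repCoo_anaw,
                  repAna_pos (List.prefix_append _ _)]
                rw [show (9 : Nat) = ("analytics".toList).length from rfl, List.drop_left]; rfl
              rw [hF, hdrop]
              congr 1
              refine ih m ?_ ?_
              · have := congrArg List.length hm
                simp only [List.length_append, List.length_cons,
                show ("analytics".toList).length = 9 from rfl] at this hl ⊢
                omega
              · intro hx
                exact hbad (hx.trans (show m <:+ (c :: t) from hm ▸ ⟨"analytics".toList, rfl⟩).isInfix)
            · have hb1 : List.isPrefixOf "registration".toList (c :: t) = false :=
                Bool.eq_false_iff.mpr (fun hb => h1 (List.isPrefixOf_iff_prefix.mp hb))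
              have hb2 : List.isPrefixOf "approval".toList (c :: t) = false :=
                Bool.eq_false_iff.mpr (fun hb => h2 (List.isPrefixOf_iff_prefix.mp hb))
              have hb3 : List.isPrefixOf "coordination".toList (c :: t) = false :=
                Bool.eq_false_iff.mpr (fun hb => h3 (List.isPrefixOf_iff_prefix.mp hb))
              have hb4 : List.isPrefixOf "analytics".toList (c :: t) = false :=
                Bool.eq_false_iff.mpr (fun hb => h4 (List.isPrefixOf_iff_prefix.mp hb))
              rw [simplify_response_py_altGo]
              simp only [hb1, hb2, hb3, hb4, if_false, Bool.false_eq_true]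
              have e1 : repReg (c :: t) = c :: repReg t := repReg_neg h1
              have h2' : ¬ "approval".toList <+: (c :: repReg t) := by
                intro hx
                refine h2 (trans_app_reg ?_)
                rw [e1]; exact hx
              have e2 : repApp (repReg (c :: t)) = c :: repApp (repReg t) := by
                rw [e1, repApp_neg h2']
              have h3' : ¬ "coordination".toList <+: (c :: repApp (repReg t)) := by
                intro hx
                have hx' : "coordination".toList <+: repApp (repReg (c :: t)) := by
                  rw [e2]; exact hx
                exact h3 (trans_coo_reg (trans_coo_per hx'))
              have e3 : repCoo (repApp (repReg (c :: t))) = c :: repCoo (repApp (repReg t)) := by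
                rw [e2, repCoo_neg h3']
              have h4' : ¬ "analytics".toList <+: (c :: repCoo (repApp (repReg t))) := by
                intro hx
                have hx' : "analytics".toList <+: repCoo (repApp (repReg (c :: t))) := by
                  rw [e3]; exact hx
                have hy : "analytics".toList <+: repReg (c :: t) :=
                  trans_ana_per (trans_ana_org hx')
                rcases pvAnaThroughReg hy with hL | hB
                · exact h4 hL
                · exact hbad hB.isInfix
              have e4 : pvF (c :: t) = c :: pvF t := by
                rw [pvF, e3, repAna_neg h4']; rfl
              rw [e4]
              congr 1
              refine ih t (by simp only [List.length_cons] at hl; omega) ?_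
              intro hx
              exact hbad (hx.trans (show t <:+ (c :: t) from ⟨[c], rfl⟩).isInfix)


-- extra pass-through windows used by the tightness proof
theorem repReg_analit (Y : List Char) :
    repReg ("analytic".toList ++ Y) = "analytic".toList ++ repReg Y :=
  pvRep_append _ _ _ _ _ (by unfold pvClean; decide)

theorem repApp_analit (Y : List Char) :
    repApp ("analytic".toList ++ Y) = "analytic".toList ++ repApp Y :=
  pvRep_append _ _ _ _ _ (by unfold pvClean; decide)

theorem repCoo_anlsgn (Y : List Char) :
    repCoo ("analyticsign up".toList ++ Y) = "analyticsign up".toList ++ repCoo Y :=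
  pvRep_append _ _ _ _ _ (by unfold pvClean; decide)

-- locating an infix occurrence
theorem pvInfix_drop {bad l : List Char} (h : bad <:+: l) : ∃ i, bad <+: List.drop i l := by
  obtain ⟨s, t, hst⟩ := h
  refine ⟨s.length, ?_⟩
  rw [← hst, List.append_assoc, List.drop_left]
  exact List.prefix_append _ _

theorem pvDrop_infix {bad l : List Char} {i : Nat} (h : bad <+: List.drop i l) : bad <:+: l :=
  h.isInfix.trans (List.drop_suffix i l).isInfix

-- an occurrence of bad cannot start inside the matched key w, so it survives the skip
theorem pvSkip {bad w m : List Char}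
    (Hw : ∀ i, i < w.length → ¬ (List.take bad.length (List.drop i w) <+: bad))
    (h : bad <:+: (w ++ m)) : bad <:+: m := by
  obtain ⟨i, hi⟩ := pvInfix_drop h
  by_cases hlt : i < w.length
  · rw [List.drop_append_of_le_length (le_of_lt hlt)] at hi
    exact absurd (pv_take_prefix hi) (Hw i hlt)
  · push_neg at hlt
    rw [List.drop_append, List.drop_eq_nil_of_le hlt, List.nil_append] at hi
    exact pvDrop_infix hi

-- with the cascade pattern at the head, the outputs differ in their first character
theorem pvHeadDiff (fuel : Nat) (m : List Char) :
    simplify_response_py_altGo (fuel + 1) ("analyticregistration".toList ++ m) ≠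
      pvF ("analyticregistration".toList ++ m) := by
  have hq1 : ¬ "registration".toList <+: ("analyticregistration".toList ++ m) :=
    pv_not_prefix_append (by decide) m
  have hq2 : ¬ "approval".toList <+: ("analyticregistration".toList ++ m) :=
    pv_not_prefix_append (by decide) m
  have hq3 : ¬ "coordination".toList <+: ("analyticregistration".toList ++ m) :=
    pv_not_prefix_append (by decide) m
  have hq4 : ¬ "analytics".toList <+: ("analyticregistration".toList ++ m) :=
    pv_not_prefix_append (by decide) m
  have hB : simplify_response_py_altGo (fuel + 1) ("analyticregistration".toList ++ m) =
      'a' :: simplify_response_py_altGo fuel ("nalyticregistration".toList ++ m) := by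
    have hqb1 : List.isPrefixOf "registration".toList
        ('a' :: ("nalyticregistration".toList ++ m)) = false :=
      Bool.eq_false_iff.mpr (fun hb => hq1 (List.isPrefixOf_iff_prefix.mp hb))
    have hqb2 : List.isPrefixOf "approval".toList
        ('a' :: ("nalyticregistration".toList ++ m)) = false :=
      Bool.eq_false_iff.mpr (fun hb => hq2 (List.isPrefixOf_iff_prefix.mp hb))
    have hqb3 : List.isPrefixOf "coordination".toList
        ('a' :: ("nalyticregistration".toList ++ m)) = false :=
      Bool.eq_false_iff.mpr (fun hb => hq3 (List.isPrefixOf_iff_prefix.mp hb))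
    have hqb4 : List.isPrefixOf "analytics".toList
        ('a' :: ("nalyticregistration".toList ++ m)) = false :=
      Bool.eq_false_iff.mpr (fun hb => hq4 (List.isPrefixOf_iff_prefix.mp hb))
    rw [show "analyticregistration".toList ++ m =
        'a' :: ("nalyticregistration".toList ++ m) from rfl]
    rw [simplify_response_py_altGo]
    simp only [hqb1, hqb2, hqb3, hqb4, if_false, Bool.false_eq_true]
  have hA : pvF ("analyticregistration".toList ++ m) =
      "information".toList ++ repAna ("ign up".toList ++ repCoo (repApp (repReg m))) := by
    rw [show "analyticregistration".toList ++ m =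
        "analytic".toList ++ ("registration".toList ++ m) from rfl]
    rw [pvF, repReg_analit, repReg_pos (List.prefix_append _ _),
      show (12 : Nat) = ("registration".toList).length from rfl, List.drop_left]
    rw [repApp_analit, repApp_sgn]
    rw [show "analytic".toList ++ ("sign up".toList ++ repApp (repReg m)) =
        "analyticsign up".toList ++ repApp (repReg m) from by
      rw [← List.append_assoc,
        show "analytic".toList ++ "sign up".toList = "analyticsign up".toList from by decide]]
    rw [repCoo_anlsgn]
    rw [show "analyticsign up".toList = "analytics".toList ++ "ign up".toList from by decide,
      List.append_assoc]
    rw [repAna_pos (List.prefix_append _ _),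
      show (9 : Nat) = ("analytics".toList).length from rfl, List.drop_left]
  intro heq
  rw [hB, hA] at heq
  rw [show "information".toList ++ repAna ("ign up".toList ++ repCoo (repApp (repReg m))) =
      'i' :: ("nformation".toList ++ repAna ("ign up".toList ++ repCoo (repApp (repReg m))))
      from rfl] at heq
  injection heq with hc _
  exact absurd hc (by decide)

-- inside the cascade region the two programs differ everywhere
theorem pvTight : ∀ (fuel : Nat) (l : List Char), l.length ≤ fuel →
    ("analyticregistration".toList <:+: l) →
    simplify_response_py_altGo fuel l ≠ pvF l := by
  intro fuel
  induction fuel with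
  | zero =>
    intro l hl hbad _
    have hnil : l = [] := List.eq_nil_of_length_eq_zero (Nat.le_zero.mp hl)
    subst hnil
    obtain ⟨s, t, hst⟩ := hbad
    have := congrArg List.length hst
    simp only [List.length_append, List.length_nil,
      show ("analyticregistration".toList).length = 20 from rfl] at this
    omega
  | succ n ih =>
    intro l hl hbad
    cases l with
    | nil =>
      obtain ⟨s, t, hst⟩ := hbad
      have := congrArg List.length hst
      simp only [List.length_append, List.length_nil,
        show ("analyticregistration".toList).length = 20 from rfl] at this
      omega
    | cons c t =>
      by_cases hbp : "analyticregistration".toList <+: (c :: t)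
      · obtain ⟨m, hm⟩ := hbp
        rw [← hm]
        exact pvHeadDiff n m
      · by_cases h1 : "registration".toList <+: (c :: t)
        · have hb1 : List.isPrefixOf "registration".toList (c :: t) = true :=
            List.isPrefixOf_iff_prefix.mpr h1
          rw [simplify_response_py_altGo]
          simp only [hb1, if_true]
          obtain ⟨m, hm⟩ := h1
          have hdrop : List.drop 12 (c :: t) = m := by
            rw [← hm, show (12 : Nat) = ("registration".toList).length from rfl, List.drop_left]
          have hF : pvF (c :: t) = "sign up".toList ++ pvF m := by
            rw [← hm, pvF, repReg_pos (List.prefix_append _ _),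
              show (12 : Nat) = ("registration".toList).length from rfl, List.drop_left,
              repApp_sgn, repCoo_sgn, repAna_sgn]
            rfl
          have hskip : "analyticregistration".toList <:+: m :=
            pvSkip (by decide) (hm ▸ hbad)
          rw [hF, hdrop]
          intro heq
          refine ih m ?_ hskip (List.append_cancel_left heq)
          have := congrArg List.length hm
          simp only [List.length_append, List.length_cons,
            show ("registration".toList).length = 12 from rfl] at this hl ⊢
          omega
        · by_cases h2 : "approval".toList <+: (c :: t)
          · have hb1 : List.isPrefixOf "registration".toList (c :: t) = false :=
              Bool.eq_false_iff.mpr (fun hb => h1 (List.isPrefixOf_iff_prefix.mp hb))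
            have hb2 : List.isPrefixOf "approval".toList (c :: t) = true :=
              List.isPrefixOf_iff_prefix.mpr h2
            rw [simplify_response_py_altGo]
            simp only [hb1, hb2, if_true, if_false, Bool.false_eq_true]
            obtain ⟨m, hm⟩ := h2
            have hdrop : List.drop 8 (c :: t) = m := by
              rw [← hm, show (8 : Nat) = ("approval".toList).length from rfl, List.drop_left]
            have hF : pvF (c :: t) = "permission".toList ++ pvF m := by
              rw [← hm, pvF, repReg_appw, repApp_pos (List.prefix_append _ _),
                show (8 : Nat) = ("approval".toList).length from rfl, List.drop_left,
                repCoo_per, repAna_per]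
              rfl
            have hskip : "analyticregistration".toList <:+: m :=
              pvSkip (by decide) (hm ▸ hbad)
            rw [hF, hdrop]
            intro heq
            refine ih m ?_ hskip (List.append_cancel_left heq)
            have := congrArg List.length hm
            simp only [List.length_append, List.length_cons,
              show ("approval".toList).length = 8 from rfl] at this hl ⊢
            omega
          · by_cases h3 : "coordination".toList <+: (c :: t)
            · have hb1 : List.isPrefixOf "registration".toList (c :: t) = false :=
                Bool.eq_false_iff.mpr (fun hb => h1 (List.isPrefixOf_iff_prefix.mp hb))
              have hb2 : List.isPrefixOf "approval".toList (c :: t) = false :=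
                Bool.eq_false_iff.mpr (fun hb => h2 (List.isPrefixOf_iff_prefix.mp hb))
              have hb3 : List.isPrefixOf "coordination".toList (c :: t) = true :=
                List.isPrefixOf_iff_prefix.mpr h3
              rw [simplify_response_py_altGo]
              simp only [hb1, hb2, hb3, if_true, if_false, Bool.false_eq_true]
              obtain ⟨m, hm⟩ := h3
              have hdrop : List.drop 12 (c :: t) = m := by
                rw [← hm, show (12 : Nat) = ("coordination".toList).length from rfl,
                  List.drop_left]
              have hF : pvF (c :: t) = "organization".toList ++ pvF m := by
                rw [← hm, pvF, repReg_coow, repApp_coow, repCoo_pos (List.prefix_append _ _),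
                  show (12 : Nat) = ("coordination".toList).length from rfl, List.drop_left,
                  repAna_org]
                rfl
              have hskip : "analyticregistration".toList <:+: m :=
                pvSkip (by decide) (hm ▸ hbad)
              rw [hF, hdrop]
              intro heq
              refine ih m ?_ hskip (List.append_cancel_left heq)
              have := congrArg List.length hm
              simp only [List.length_append, List.length_cons,
                show ("coordination".toList).length = 12 from rfl] at this hl ⊢
              omega
            · by_cases h4 : "analytics".toList <+: (c :: t)
              · have hb1 : List.isPrefixOf "registration".toList (c :: t) = false :=
                  Bool.eq_false_iff.mpr (fun hb => h1 (List.isPrefixOf_iff_prefix.mp hb))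
                have hb2 : List.isPrefixOf "approval".toList (c :: t) = false :=
                  Bool.eq_false_iff.mpr (fun hb => h2 (List.isPrefixOf_iff_prefix.mp hb))
                have hb3 : List.isPrefixOf "coordination".toList (c :: t) = false :=
                  Bool.eq_false_iff.mpr (fun hb => h3 (List.isPrefixOf_iff_prefix.mp hb))
                have hb4 : List.isPrefixOf "analytics".toList (c :: t) = true :=
                  List.isPrefixOf_iff_prefix.mpr h4
                rw [simplify_response_py_altGo]
                simp only [hb1, hb2, hb3, hb4, if_true, if_false, Bool.false_eq_true]
                obtain ⟨m, hm⟩ := h4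
                have hdrop : List.drop 9 (c :: t) = m := by
                  rw [← hm, show (9 : Nat) = ("analytics".toList).length from rfl,
                    List.drop_left]
                have hF : pvF (c :: t) = "information".toList ++ pvF m := by
                  rw [← hm, pvF, repReg_anaw, repApp_anaw, repCoo_anaw,
                    repAna_pos (List.prefix_append _ _),
                    show (9 : Nat) = ("analytics".toList).length from rfl, List.drop_left]
                  rfl
                have hskip : "analyticregistration".toList <:+: m :=
                  pvSkip (by decide) (hm ▸ hbad)
                rw [hF, hdrop]
                intro heq
                refine ih m ?_ hskip (List.append_cancel_left heq)
                have := congrArg List.length hm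
                simp only [List.length_append, List.length_cons,
                  show ("analytics".toList).length = 9 from rfl] at this hl ⊢
                omega
              · have hbt : "analyticregistration".toList <:+: t :=
                  (List.infix_cons_iff.mp hbad).resolve_left hbp
                have hb1 : List.isPrefixOf "registration".toList (c :: t) = false :=
                  Bool.eq_false_iff.mpr (fun hb => h1 (List.isPrefixOf_iff_prefix.mp hb))
                have hb2 : List.isPrefixOf "approval".toList (c :: t) = false :=
                  Bool.eq_false_iff.mpr (fun hb => h2 (List.isPrefixOf_iff_prefix.mp hb))
                have hb3 : List.isPrefixOf "coordination".toList (c :: t) = false :=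
                  Bool.eq_false_iff.mpr (fun hb => h3 (List.isPrefixOf_iff_prefix.mp hb))
                have hb4 : List.isPrefixOf "analytics".toList (c :: t) = false :=
                  Bool.eq_false_iff.mpr (fun hb => h4 (List.isPrefixOf_iff_prefix.mp hb))
                rw [simplify_response_py_altGo]
                simp only [hb1, hb2, hb3, hb4, if_false, Bool.false_eq_true]
                have e1 : repReg (c :: t) = c :: repReg t := repReg_neg h1
                have h2' : ¬ "approval".toList <+: (c :: repReg t) := by
                  intro hx
                  refine h2 (trans_app_reg ?_)
                  rw [e1]; exact hx
                have e2 : repApp (repReg (c :: t)) = c :: repApp (repReg t) := by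
                  rw [e1, repApp_neg h2']
                have h3' : ¬ "coordination".toList <+: (c :: repApp (repReg t)) := by
                  intro hx
                  have hx' : "coordination".toList <+: repApp (repReg (c :: t)) := by
                    rw [e2]; exact hx
                  exact h3 (trans_coo_reg (trans_coo_per hx'))
                have e3 : repCoo (repApp (repReg (c :: t))) = c :: repCoo (repApp (repReg t)) := by
                  rw [e2, repCoo_neg h3']
                have h4' : ¬ "analytics".toList <+: (c :: repCoo (repApp (repReg t))) := by
                  intro hx
                  have hx' : "analytics".toList <+: repCoo (repApp (repReg (c :: t))) := by
                    rw [e3]; exact hx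
                  have hy : "analytics".toList <+: repReg (c :: t) :=
                    trans_ana_per (trans_ana_org hx')
                  rcases pvAnaThroughReg hy with hL | hB
                  · exact h4 hL
                  · exact hbp hB
                have e4 : pvF (c :: t) = c :: pvF t := by
                  rw [pvF, e3, repAna_neg h4']; rfl
                rw [e4]
                intro heq
                exact ih t (by simp only [List.length_cons] at hl; omega) hbt
                  (by simpa using heq)

-- list-level views of the two ports
theorem portA_toList (r : String) : (simplify_response_py r).toList = pvF r.toList := by
  unfold simplify_response_py
  simp only [List.foldl_cons, List.foldl_nil]
  simp only [PySem.Str.replace, String.toList_ofList]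
  rw [show "registration".toList = 'r' :: "egistration".toList from rfl, replace_eq_pvRep,
    show "approval".toList = 'a' :: "pproval".toList from rfl, replace_eq_pvRep,
    show "coordination".toList = 'c' :: "oordination".toList from rfl, replace_eq_pvRep,
    show "analytics".toList = 'a' :: "nalytics".toList from rfl, replace_eq_pvRep]
  rfl

theorem portB_toList (r : String) :
    (simplify_response_py_alt r).toList =
      simplify_response_py_altGo r.toList.length r.toList := by
  simp [simplify_response_py_alt, String.toList_ofList]

theorem simplify_response_py_spec : Claim_unchanged_simplify_response_py := by
  intro response _
  unfold Spec_simplify_response_py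
  intro hD
  have hbad : ¬ ("analyticregistration".toList <:+: response.toList) := by
    intro hx
    exact hD ((PySem.Str.isIn_iff_infix _ _).mpr hx)
  apply String.toList_inj.mp
  rw [portA_toList, portB_toList, pvMain _ _ le_rfl hbad]

theorem simplify_response_py_changed : Claim_changed_simplify_response_py := by
  unfold Claim_changed_simplify_response_py; decide

theorem simplify_response_py_tight : Claim_exact_simplify_response_py := by
  intro response _ hD heq
  have hbad : "analyticregistration".toList <:+: response.toList :=
    (PySem.Str.isIn_iff_infix _ _).mp hD
  exact pvTight response.toList.length response.toList le_rfl hbad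
    (by rw [← portB_toList, ← heq, portA_toList])
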